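-- pv_equiv track=rewrite | github.com/lesleychou/vae_cloud_computing | e2e_system/betavae_main.py | calculate_latent_dim_hierarchy
-- ===== SOURCE A (Python) =====
-- from collections import defaultdict, deque
--
-- def calculate_latent_dim_hierarchy(bn_structure):
--     # Build a graph of the BN structure
--     graph = defaultdict(list)
--     inverse_graph = defaultdict(list)
--     all_nodes = set()
--
--     for parent, children in bn_structure:
--         all_nodes.add(parent)
--         all_nodes.update(children)
--         for child in children:
--             graph[parent].append(child)
--             inverse_graph[child].append(parent)
--
--     # Initialize a queue for BFS and a dictionary to track the layer of each node
--     layer = {}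
--     queue = deque()
--
--     # Start with input nodes (nodes that have no parents)
--     for node in all_nodes:
--         if len(inverse_graph[node]) == 0:  # Input node (no parents)
--             layer[node] = 0
--             queue.append(node)
--
--     # Perform BFS to assign layers
--     while queue:
--         node = queue.popleft()
--         current_layer = layer[node]
--
--         for neighbor in graph[node]:
--             if neighbor not in layer:  # If the neighbor hasn't been assigned a layer yet
--                 layer[neighbor] = current_layer + 1
--                 queue.append(neighbor)
--
--     # Count how many nodes exist at each layer
--     layer_counts = defaultdict(int)
--     for node in layer:
--         layer_counts[layer[node]] += 1
--
--     # Create the latent_dim_hierarchy list, which represents the size of each layer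
--     latent_dim_hierarchy = [layer_counts[i] for i in range(max(layer.values()) + 1)]
--
--     return latent_dim_hierarchy
-- ===== SOURCE B (Python) =====
-- def calculate_latent_dim_hierarchy(bn_structure):
--     # Level-synchronous frontier expansion: emit each layer's size directly,
--     # without a per-node layer dict or a separate counting pass.
--     graph = {}
--     nodes = []          # distinct nodes in first-appearance order
--     seen = set()
--     has_parent = set()
--     for parent, children in bn_structure:
--         graph.setdefault(parent, []).extend(children)
--         for n in (parent, *children):
--             if n not in seen:
--                 seen.add(n)
--                 nodes.append(n)
--         has_parent.update(children)
--     frontier = [n for n in nodes if n not in has_parent]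
--     remaining = {n for n in nodes if n in has_parent}
--     counts = []
--     while frontier:
--         counts.append(len(frontier))
--         nxt = []
--         for n in frontier:
--             for c in graph.get(n, []):
--                 if c in remaining:
--                     remaining.remove(c)
--                     nxt.append(c)
--         frontier = nxt
--     return counts
-- ===== Notes on version B (the rewrite author's own statement) =====
-- stated objective: simpler
-- what changed: Replaces the queue-based BFS that fills a per-node layer dict, a separate per-layer counting dict and a final max()+range() pass with a level-synchronous frontier expansion that emits each layer's size directly as it is discovered.
import Mathlib
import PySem

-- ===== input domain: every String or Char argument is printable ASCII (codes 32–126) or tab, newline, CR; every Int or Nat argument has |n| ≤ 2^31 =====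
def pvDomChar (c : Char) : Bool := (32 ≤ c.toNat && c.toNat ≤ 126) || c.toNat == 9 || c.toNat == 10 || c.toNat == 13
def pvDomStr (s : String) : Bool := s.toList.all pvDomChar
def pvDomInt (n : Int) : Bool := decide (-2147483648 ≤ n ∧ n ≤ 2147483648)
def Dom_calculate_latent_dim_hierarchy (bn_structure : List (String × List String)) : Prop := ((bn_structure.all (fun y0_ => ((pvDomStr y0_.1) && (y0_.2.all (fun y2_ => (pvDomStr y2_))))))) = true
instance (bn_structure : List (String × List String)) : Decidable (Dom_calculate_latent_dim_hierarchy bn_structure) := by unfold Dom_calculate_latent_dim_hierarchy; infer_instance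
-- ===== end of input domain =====

-- B replaces A's queue BFS + per-node layer dict + counting pass by a level-synchronous
-- frontier expansion that emits each layer's size directly (objective: simpler).
-- Python's hash iteration order over the set all_nodes is not modelled: it is ported in
-- insertion order, which is sound here because the returned counts do not depend on it.

-- ===== PORT A =====
def buildA (bn_structure : List (String × List String)) :
    PySem.Dict String (List String) × PySem.Dict String (List String) × PySem.Set String :=
  bn_structure.foldl
    (fun st pc =>
      let an := PySem.Set.update (PySem.Set.add st.2.2 pc.1) pc.2
      let gi := pc.2.foldl
        (fun gi child =>
          (gi.1.modify pc.1 [] (· ++ [child]), gi.2.modify child [] (· ++ [pc.1])))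
        (st.1, st.2.1)
      (gi.1, gi.2, an))
    (PySem.Dict.empty, PySem.Dict.empty, PySem.Set.empty)

def initRootsA (inv : PySem.Dict String (List String)) (an : PySem.Set String) :
    PySem.Dict String Int × List String :=
  an.foldl
    (fun st node =>
      if (inv.getD node []).length = 0 then (st.1.insert node 0, st.2 ++ [node]) else st)
    (PySem.Dict.empty, [])

-- one BFS relaxation of a single neighbour; the second conjunct of the guard
-- (membership in the unassigned-node bookkeeping list) is implied by the first and
-- only makes the loop's termination measurable
def bfsStepA (cur : Int) (st : List String × List String × PySem.Dict String Int)
    (nb : String) : List String × List String × PySem.Dict String Int :=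
  if !st.2.2.contains nb && st.1.contains nb then
    (st.1.erase nb, st.2.1 ++ [nb], st.2.2.insert nb (cur + 1))
  else st

theorem bfsStepA_foldl_len (cur : Int) (cs : List String) :
    ∀ st : List String × List String × PySem.Dict String Int,
      ((cs.foldl (bfsStepA cur) st).1.length + (cs.foldl (bfsStepA cur) st).2.1.length)
        ≤ st.1.length + st.2.1.length := by
  induction cs with
  | nil => intro st; simp
  | cons c cs ih =>
    rintro ⟨U, q, layer⟩
    refine le_trans (ih _) ?_
    unfold bfsStepA
    dsimp only
    split
    · rename_i h
      have hm : c ∈ U := List.mem_of_elem_eq_true (by simpa using (Bool.and_elim_right h))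
      have h1 := List.length_erase_add_one hm
      simp only [List.length_append, List.length_cons, List.length_nil] at *
      omega
    · exact le_rfl

def bfsA (g : PySem.Dict String (List String)) :
    List String → List String → PySem.Dict String Int → PySem.Dict String Int
  | _, [], layer => layer
  | unassigned, node :: rest, layer =>
    let cur := layer.getD node 0
    let st := (g.getD node []).foldl (bfsStepA cur) (unassigned, rest, layer)
    bfsA g st.1 st.2.1 st.2.2
termination_by unassigned queue _ => unassigned.length + queue.length
decreasing_by
  have := bfsStepA_foldl_len (layer.getD node 0) (g.getD node []) (unassigned, rest, layer)
  dsimp only at this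
  simp only [List.length_cons]
  omega

def calculate_latent_dim_hierarchy (bn_structure : List (String × List String)) : List Int :=
  let b := buildA bn_structure
  let lr := initRootsA b.2.1 b.2.2
  -- termination bookkeeping: the nodes not yet assigned a layer
  let unassigned := b.2.2.filter (fun n => !((b.2.1.getD n []).length == 0))
  let layer := bfsA b.1 unassigned lr.2 lr.1
  let counts := layer.items.foldl (fun c kv => c.modify kv.2 0 (· + 1)) PySem.Dict.empty
  match PySem.List.max? layer.values (fun v => v) with
  | none => []  -- Python: max() of an empty sequence raises ValueError; excluded by Pre_
  | some m => (PySem.List.pyRange 0 (m + 1)).map (fun i => counts.getD i 0)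

-- ===== PORT B =====
def buildB (bn_structure : List (String × List String)) :
    PySem.Dict String (List String) × PySem.Set String × PySem.Set String :=
  bn_structure.foldl
    (fun st pc =>
      let g := st.1.insert pc.1 (st.1.getD pc.1 [] ++ pc.2)  -- setdefault(p, []).extend(cs)
      let nodes := (pc.1 :: pc.2).foldl PySem.Set.add st.2.1 -- seen/nodes bookkeeping
      let hp := PySem.Set.update st.2.2 pc.2
      (g, nodes, hp))
    (PySem.Dict.empty, PySem.Set.empty, PySem.Set.empty)

def scanStepB (st : List String × List String) (c : String) : List String × List String :=
  if st.1.contains c then (st.1.erase c, st.2 ++ [c]) else st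

def scanB (g : PySem.Dict String (List String)) (frontier remaining : List String) :
    List String × List String :=
  frontier.foldl (fun st n => (g.getD n []).foldl scanStepB st) (remaining, [])

theorem scanStepB_foldl_len (cs : List String) :
    ∀ st : List String × List String,
      ((cs.foldl scanStepB st).1.length + (cs.foldl scanStepB st).2.length)
        ≤ st.1.length + st.2.length := by
  induction cs with
  | nil => intro st; simp
  | cons c cs ih =>
    rintro ⟨U, out⟩
    refine le_trans (ih _) ?_
    unfold scanStepB
    dsimp only
    split
    · rename_i h
      have hm : c ∈ U := List.mem_of_elem_eq_true (by simpa using h)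
      have h1 := List.length_erase_add_one hm
      simp only [List.length_append, List.length_cons, List.length_nil] at *
      omega
    · exact le_rfl

theorem scanB_len (g : PySem.Dict String (List String)) (frontier remaining : List String) :
    (scanB g frontier remaining).1.length + (scanB g frontier remaining).2.length
      ≤ remaining.length := by
  have h : ∀ (fr : List String) (st : List String × List String),
      ((fr.foldl (fun st n => (g.getD n []).foldl scanStepB st) st).1.length
        + (fr.foldl (fun st n => (g.getD n []).foldl scanStepB st) st).2.length)
        ≤ st.1.length + st.2.length := by
    intro fr
    induction fr with
    | nil => intro st; simp
    | cons n fr ih => intro st; exact le_trans (ih _) (scanStepB_foldl_len _ _)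
  simpa using h frontier (remaining, [])

def loopB (g : PySem.Dict String (List String)) :
    List String → List String → List Int
  | [], _ => []
  | n :: fr, remaining =>
    let st := scanB g (n :: fr) remaining
    ((n :: fr).length : Int) :: loopB g st.2 st.1
termination_by frontier remaining => remaining.length + frontier.length
decreasing_by
  have := scanB_len g (n :: fr) remaining
  simp only [List.length_cons]
  omega

def calculate_latent_dim_hierarchy_alt (bn_structure : List (String × List String)) : List Int :=
  let b := buildB bn_structure
  let frontier := b.2.1.filter (fun n => !(PySem.Set.contains b.2.2 n))
  let remaining := b.2.1.filter (fun n => PySem.Set.contains b.2.2 n)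
  loopB b.1 frontier remaining

-- ===== PRECONDITION & SPEC =====
-- Pre_ excludes exactly the inputs with no root node (every mentioned node occurs in some
-- children list, e.g. the empty input or an all-cyclic structure): there A's
-- max(layer.values()) is applied to an empty sequence and raises ValueError.
def Pre_calculate_latent_dim_hierarchy (bn_structure : List (String × List String)) : Prop :=
  ∃ pr ∈ bn_structure, ∀ qr ∈ bn_structure, pr.1 ∉ qr.2
instance (bn_structure : List (String × List String)) : Decidable (Pre_calculate_latent_dim_hierarchy bn_structure) := by unfold Pre_calculate_latent_dim_hierarchy; infer_instance

def pvWitness_calculate_latent_dim_hierarchy : (List (String × List String)) := [("a", ["b"])]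

def Spec_calculate_latent_dim_hierarchy (bn_structure : List (String × List String)) (out : List Int) : Prop := out = calculate_latent_dim_hierarchy_alt bn_structure
instance (bn_structure : List (String × List String)) (out : List Int) : Decidable (Spec_calculate_latent_dim_hierarchy bn_structure out) := by unfold Spec_calculate_latent_dim_hierarchy; infer_instance

-- ===== CLAIM (what is proved, stated in full; the proofs are below) =====
def Claim_equal_calculate_latent_dim_hierarchy : Prop := ∀ (bn_structure : List (String × List String)), Dom_calculate_latent_dim_hierarchy bn_structure → Pre_calculate_latent_dim_hierarchy bn_structure → Spec_calculate_latent_dim_hierarchy bn_structure (calculate_latent_dim_hierarchy bn_structure)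


-- ===== LEMMAS AND PROOFS =====

-- ---- generic: inserting a batch of keys with one value ----

def insAll (d : PySem.Dict String Int) (l : List String) (v : Int) : PySem.Dict String Int :=
  l.foldl (fun d x => d.insert x v) d

theorem insAll_contains (l : List String) : ∀ (d : PySem.Dict String Int) (v : Int) (x : String),
    (insAll d l v).contains x = true ↔ x ∈ l ∨ d.contains x = true := by
  induction l with
  | nil => intro d v x; simp [insAll]
  | cons c l ih =>
    intro d v x
    show (insAll (d.insert c v) l v).contains x = true ↔ _
    rw [ih]
    rw [PySem.Dict.contains_insert]
    simp only [Bool.or_eq_true, beq_iff_eq, List.mem_cons]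
    tauto

theorem insAll_getD_of_not_mem (l : List String) : ∀ (d : PySem.Dict String Int) (v : Int)
    (x : String), x ∉ l → (insAll d l v).getD x 0 = d.getD x 0 := by
  induction l with
  | nil => intro d v x _; rfl
  | cons c l ih =>
    intro d v x hx
    show (insAll (d.insert c v) l v).getD x 0 = _
    rw [ih _ _ _ (by simp_all), PySem.Dict.getD_insert]
    simp_all

theorem insAll_getD_of_mem (l : List String) : ∀ (d : PySem.Dict String Int) (v : Int)
    (x : String), x ∈ l → (insAll d l v).getD x 0 = v := by
  induction l with
  | nil => intro d v x hx; simp at hx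
  | cons c l ih =>
    intro d v x hx
    show (insAll (d.insert c v) l v).getD x 0 = v
    by_cases hm : x ∈ l
    · exact ih _ _ _ hm
    · have hx : x = c := by simp_all
      rw [insAll_getD_of_not_mem _ _ _ _ hm, PySem.Dict.getD_insert]
      simp [hx]

theorem insAll_items (l : List String) (d : PySem.Dict String Int) (v : Int)
    (hfresh : ∀ a ∈ l, d.contains a = false) (hnd : l.Nodup) :
    (insAll d l v).items = d.items ++ l.map (fun a => (a, v)) := by
  simpa using PySem.Dict.items_foldl_insert_fresh l (fun a => a) (fun _ => v) d hfresh (by simpa using hnd)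

theorem insAll_values (l : List String) (d : PySem.Dict String Int) (v : Int)
    (hfresh : ∀ a ∈ l, d.contains a = false) (hnd : l.Nodup) :
    (insAll d l v).values = d.values ++ l.map (fun _ => v) := by
  show (insAll d l v).items.map Prod.snd = d.items.map Prod.snd ++ _
  rw [insAll_items l d v hfresh hnd]
  simp [Function.comp_def]

-- ---- the level scan: invariants ----

def ScanInv (U0 : List String) (st : List String × List String) : Prop :=
  st.1.Nodup ∧ st.2.Nodup ∧ (∀ x ∈ st.1, x ∈ U0) ∧ (∀ x ∈ st.2, x ∈ U0) ∧
    (∀ x ∈ st.2, x ∉ st.1)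

theorem scanInv_step {U0 : List String} {st : List String × List String} (c : String)
    (h : ScanInv U0 st) : ScanInv U0 (scanStepB st c) := by
  obtain ⟨h1, h2, h3, h4, h5⟩ := h
  unfold scanStepB
  split
  · rename_i hc
    have hcm : c ∈ st.1 := List.mem_of_elem_eq_true (by simpa using hc)
    refine ⟨List.Nodup.erase c h1, ?_, ?_, ?_, ?_⟩
    · simp only [List.nodup_append, List.nodup_cons]
      exact ⟨h2, by simp, by intro x hx; simp; intro hxc; exact (h5 x hx) (hxc ▸ hcm)⟩
    · intro x hx; exact h3 x (List.mem_of_mem_erase hx)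
    · intro x hx
      rcases List.mem_append.mp hx with hx | hx
      · exact h4 x hx
      · simp at hx; exact hx ▸ h3 c hcm
    · intro x hx
      rcases List.mem_append.mp hx with hx | hx
      · intro hmem; exact h5 x hx (List.mem_of_mem_erase hmem)
      · simp at hx; subst hx; exact List.Nodup.not_mem_erase h1
  · exact ⟨h1, h2, h3, h4, h5⟩

theorem scanInv_foldl_inner {U0 : List String} (cs : List String) :
    ∀ st, ScanInv U0 st → ScanInv U0 (cs.foldl scanStepB st) := by
  induction cs with
  | nil => intro st h; exact h
  | cons c cs ih => intro st h; exact ih _ (scanInv_step c h)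

theorem scanInv_scanB (g : PySem.Dict String (List String)) (fr U : List String)
    (hU : U.Nodup) : ScanInv U (scanB g fr U) := by
  have h : ∀ (fr : List String) st, ScanInv U st →
      ScanInv U (fr.foldl (fun st n => (g.getD n []).foldl scanStepB st) st) := by
    intro fr
    induction fr with
    | nil => intro st h; exact h
    | cons n fr ih => intro st h; exact ih _ (scanInv_foldl_inner _ _ h)
  exact h fr (U, []) ⟨hU, by simp, fun x hx => hx, by simp, by simp⟩

-- ---- the level scan: the output component accumulates by appending ----

theorem scan_inner_acc (cs : List String) : ∀ (U out : List String),
    cs.foldl scanStepB (U, out)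
      = ((cs.foldl scanStepB (U, [])).1, out ++ (cs.foldl scanStepB (U, [])).2) := by
  induction cs with
  | nil => intro U out; simp
  | cons c cs ih =>
    intro U out
    simp only [List.foldl_cons]
    by_cases hc : U.contains c = true
    · have e1 : scanStepB (U, out) c = (U.erase c, out ++ [c]) := by
        simp only [scanStepB]; rw [if_pos hc]
      have e2 : scanStepB (U, []) c = (U.erase c, [] ++ [c]) := by
        simp only [scanStepB]; rw [if_pos hc]
      rw [e1, e2, ih (U.erase c) (out ++ [c]), ih (U.erase c) ([] ++ [c])]
      simp
    · have e1 : scanStepB (U, out) c = (U, out) := by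
        simp only [scanStepB]; rw [if_neg hc]
      have e2 : scanStepB (U, []) c = (U, []) := by
        simp only [scanStepB]; rw [if_neg hc]
      rw [e1, e2, ih U out]

theorem scan_outer_acc (g : PySem.Dict String (List String)) (fr : List String) :
    ∀ (U out : List String),
    fr.foldl (fun st n => (g.getD n []).foldl scanStepB st) (U, out)
      = ((scanB g fr U).1, out ++ (scanB g fr U).2) := by
  induction fr with
  | nil => intro U out; simp [scanB]
  | cons n fr ih =>
    intro U out
    show fr.foldl _ ((g.getD n []).foldl scanStepB (U, out)) = _
    rw [scan_inner_acc]
    rw [ih]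
    have h2 : scanB g (n :: fr) U
        = ((scanB g fr ((g.getD n []).foldl scanStepB (U, [])).1).1,
           ((g.getD n []).foldl scanStepB (U, [])).2
             ++ (scanB g fr ((g.getD n []).foldl scanStepB (U, [])).1).2) := by
      show fr.foldl _ ((g.getD n []).foldl scanStepB (U, [])) = _
      rw [show (g.getD n []).foldl scanStepB (U, [])
            = (((g.getD n []).foldl scanStepB (U, [])).1,
               ((g.getD n []).foldl scanStepB (U, [])).2) from rfl]
      exact ih _ _
    rw [h2]
    simp

-- ---- A's inner relaxation fold is the level scan plus bookkeeping ----

theorem insAll_append (d : PySem.Dict String Int) (l1 l2 : List String) (v : Int) :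
    insAll d (l1 ++ l2) v = insAll (insAll d l1 v) l2 v := by
  simp [insAll, List.foldl_append]

theorem corrA_inner (cur : Int) (cs : List String) :
    ∀ (U q : List String) (layer : PySem.Dict String Int),
      U.Nodup → (∀ x ∈ U, layer.contains x = false) →
      cs.foldl (bfsStepA cur) (U, q, layer)
        = ((cs.foldl scanStepB (U, [])).1,
           q ++ (cs.foldl scanStepB (U, [])).2,
           insAll layer (cs.foldl scanStepB (U, [])).2 (cur + 1)) := by
  induction cs with
  | nil => intro U q layer _ _; simp [insAll]
  | cons c cs ih =>
    intro U q layer hU hdisj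
    simp only [List.foldl_cons]
    by_cases hc : U.contains c = true
    · have hcm : c ∈ U := List.mem_of_elem_eq_true (by simpa using hc)
      have hlc : layer.contains c = false := hdisj c hcm
      have eA : bfsStepA cur (U, q, layer) c
          = (U.erase c, q ++ [c], layer.insert c (cur + 1)) := by
        have hcond : (!((U, q, layer).2.2.contains c) && (U, q, layer).1.contains c) = true := by
          simp only [hlc, hc]; rfl
        simp only [bfsStepA]; rw [if_pos hcond]
      have eB : scanStepB (U, []) c = (U.erase c, [] ++ [c]) := by
        simp only [scanStepB]; rw [if_pos hc]
      rw [eA, eB]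
      have hdisj' : ∀ x ∈ U.erase c, (layer.insert c (cur + 1)).contains x = false := by
        intro x hx
        obtain ⟨hxc, hxU⟩ := (List.Nodup.mem_erase_iff hU).mp hx
        rw [PySem.Dict.contains_insert]
        simp [hxc, hdisj x hxU]
      rw [ih (U.erase c) (q ++ [c]) (layer.insert c (cur + 1)) (hU.erase c) hdisj']
      rw [scan_inner_acc cs (U.erase c) ([] ++ [c])]
      simp [insAll]
    · have eA : bfsStepA cur (U, q, layer) c = (U, q, layer) := by
        have hcond : ¬ ((!((U, q, layer).2.2.contains c) && (U, q, layer).1.contains c) = true) := by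
          simp only [Bool.and_eq_true]
          rintro ⟨-, h2⟩; exact hc h2
        simp only [bfsStepA]; rw [if_neg hcond]
      have eB : scanStepB (U, []) c = (U, []) := by
        simp only [scanStepB]; rw [if_neg hc]
      rw [eA, eB]
      exact ih U q layer hU hdisj

-- ---- processing one whole BFS level ----

theorem bfsA_level (g : PySem.Dict String (List String)) (d : Int) :
    ∀ (fr acc U : List String) (layer : PySem.Dict String Int),
      U.Nodup →
      (∀ x ∈ U, layer.contains x = false) →
      (∀ x ∈ fr, layer.contains x = true ∧ layer.getD x 0 = d) →
      (∀ x ∈ acc, layer.contains x = true ∧ layer.getD x 0 = d + 1) →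
      bfsA g U (fr ++ acc) layer
        = bfsA g (scanB g fr U).1 (acc ++ (scanB g fr U).2)
            (insAll layer (scanB g fr U).2 (d + 1)) := by
  intro fr
  induction fr with
  | nil => intros; simp [scanB, insAll]
  | cons n fr ih =>
    intro acc U layer hU hdisj hfr hacc
    have hcur : layer.getD n 0 = d := (hfr n (by simp)).2
    rw [List.cons_append, bfsA, hcur]
    have hSI : ScanInv U ((g.getD n []).foldl scanStepB (U, [])) :=
      scanInv_foldl_inner _ _ ⟨hU, by simp, fun x hx => hx, by simp, by simp⟩
    set N := (g.getD n []).foldl scanStepB (U, []) with hN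
    rw [corrA_inner d (g.getD n []) U (fr ++ acc) layer hU hdisj]
    obtain ⟨hN1nd, hN2nd, hN1U, hN2U, hN21⟩ := hSI
    have hdisj' : ∀ x ∈ N.1, (insAll layer N.2 (d + 1)).contains x = false := by
      intro x hx
      rw [Bool.eq_false_iff]
      rw [Ne, insAll_contains]
      rintro (h | h)
      · exact hN21 x h hx
      · rw [hdisj x (hN1U x hx)] at h; exact Bool.false_ne_true h
    have hmemcontains : ∀ x, layer.contains x = true → x ∉ N.2 := by
      intro x hx hmem
      rw [hdisj x (hN2U x hmem)] at hx; exact Bool.false_ne_true hx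
    have hfr' : ∀ x ∈ fr, (insAll layer N.2 (d + 1)).contains x = true ∧
        (insAll layer N.2 (d + 1)).getD x 0 = d := by
      intro x hx
      obtain ⟨hc1, hc2⟩ := hfr x (by simp [hx])
      exact ⟨(insAll_contains _ _ _ _).mpr (Or.inr hc1),
        by rw [insAll_getD_of_not_mem _ _ _ _ (hmemcontains x hc1), hc2]⟩
    have hacc' : ∀ x ∈ acc ++ N.2, (insAll layer N.2 (d + 1)).contains x = true ∧
        (insAll layer N.2 (d + 1)).getD x 0 = d + 1 := by
      intro x hx
      rcases List.mem_append.mp hx with hx | hx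
      · obtain ⟨hc1, hc2⟩ := hacc x hx
        exact ⟨(insAll_contains _ _ _ _).mpr (Or.inr hc1),
          by rw [insAll_getD_of_not_mem _ _ _ _ (hmemcontains x hc1), hc2]⟩
      · exact ⟨(insAll_contains _ _ _ _).mpr (Or.inl hx), insAll_getD_of_mem _ _ _ _ hx⟩
    have happ : fr ++ acc ++ N.2 = fr ++ (acc ++ N.2) := by simp
    dsimp only
    rw [happ, ih (acc ++ N.2) N.1 (insAll layer N.2 (d + 1)) hN1nd hdisj' hfr' hacc']
    -- align scanB over (n :: fr) with the two-stage scan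
    have hS : scanB g (n :: fr) U = ((scanB g fr N.1).1, N.2 ++ (scanB g fr N.1).2) := by
      show fr.foldl _ ((g.getD n []).foldl scanStepB (U, [])) = _
      rw [← hN, show N = (N.1, N.2) from rfl]
      exact scan_outer_acc g fr N.1 N.2
    rw [hS]
    rw [insAll_append]
    simp

-- ---- the per-level value multiset of the BFS result ----

def levelVals (g : PySem.Dict String (List String)) :
    List String → List String → Int → List Int
  | [], _, _ => []
  | n :: fr, U, d =>
    (n :: fr).map (fun _ => d)
      ++ levelVals g (scanB g (n :: fr) U).2 (scanB g (n :: fr) U).1 (d + 1)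
termination_by fr U _ => U.length + fr.length
decreasing_by
  have := scanB_len g (n :: fr) U
  simp only [List.length_cons]
  omega

theorem levelVals_unfold (g : PySem.Dict String (List String)) (fr U : List String) (d : Int)
    (h : fr ≠ []) :
    levelVals g fr U d
      = fr.map (fun _ => d) ++ levelVals g (scanB g fr U).2 (scanB g fr U).1 (d + 1) := by
  cases fr with
  | nil => exact absurd rfl h
  | cons n fr => rw [levelVals]

theorem loopB_unfold (g : PySem.Dict String (List String)) (fr U : List String)
    (h : fr ≠ []) :
    loopB g fr U = (fr.length : Int) :: loopB g (scanB g fr U).2 (scanB g fr U).1 := by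
  cases fr with
  | nil => exact absurd rfl h
  | cons n fr => rw [loopB]

theorem bfsA_values (g : PySem.Dict String (List String)) :
    ∀ (N : Nat) (fr U : List String) (layer : PySem.Dict String Int) (d : Int),
      U.length + fr.length ≤ N →
      U.Nodup →
      (∀ x ∈ U, layer.contains x = false) →
      (∀ x ∈ fr, layer.contains x = true ∧ layer.getD x 0 = d) →
      (bfsA g U fr layer).values
        = layer.values ++ levelVals g (scanB g fr U).2 (scanB g fr U).1 (d + 1) := by
  intro N
  induction N with
  | zero =>
    intro fr U layer d hlen _ _ _
    cases fr with
    | nil => rw [bfsA]; show layer.values = layer.values ++ levelVals g [] U (d + 1); rw [levelVals]; simp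
    | cons n fr => simp at hlen
  | succ N ihN =>
    intro fr U layer d hlen hU hdisj hfr
    cases fr with
    | nil => rw [bfsA]; show layer.values = layer.values ++ levelVals g [] U (d + 1); rw [levelVals]; simp
    | cons n fr' =>
      have hfrne : (n :: fr') ≠ [] := List.cons_ne_nil n fr'
      have hlvl := bfsA_level g d (n :: fr') [] U layer hU hdisj hfr (by simp)
      simp only [List.append_nil, List.nil_append] at hlvl
      rw [hlvl]
      set S := scanB g (n :: fr') U with hSdef
      obtain ⟨hS1nd, hS2nd, hS1U, hS2U, hS21⟩ := scanInv_scanB g (n :: fr') U hU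
      have hfresh : ∀ a ∈ S.2, layer.contains a = false := fun a ha => hdisj a (hS2U a ha)
      have hdisj' : ∀ x ∈ S.1, (insAll layer S.2 (d + 1)).contains x = false := by
        intro x hx
        rw [Bool.eq_false_iff, Ne, insAll_contains]
        rintro (h | h)
        · exact hS21 x h hx
        · rw [hdisj x (hS1U x hx)] at h; exact Bool.false_ne_true h
      have hfr' : ∀ x ∈ S.2, (insAll layer S.2 (d + 1)).contains x = true ∧
          (insAll layer S.2 (d + 1)).getD x 0 = d + 1 := by
        intro x hx
        exact ⟨(insAll_contains _ _ _ _).mpr (Or.inl hx), insAll_getD_of_mem _ _ _ _ hx⟩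
      have hlen' : S.1.length + S.2.length ≤ N := by
        have h1 := scanB_len g (n :: fr') U
        rw [← hSdef] at h1
        simp only [List.length_cons] at hlen
        omega
      rw [ihN S.2 S.1 (insAll layer S.2 (d + 1)) (d + 1) hlen' hS1nd hdisj' hfr']
      rw [insAll_values S.2 layer (d + 1) hfresh hS2nd]
      by_cases hS2 : S.2 = []
      · rw [hS2]
        show layer.values ++ [] ++ levelVals g (scanB g [] S.1).2 (scanB g [] S.1).1 (d + 1 + 1)
            = layer.values ++ levelVals g [] S.1 (d + 1)
        show layer.values ++ [] ++ levelVals g [] S.1 (d + 1 + 1) = _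
        rw [levelVals, levelVals]
        simp
      · rw [levelVals_unfold g S.2 S.1 (d + 1) hS2]
        simp

theorem levelVals_ge (g : PySem.Dict String (List String)) :
    ∀ (N : Nat) (fr U : List String) (d : Int),
      U.length + fr.length ≤ N → ∀ j ∈ levelVals g fr U d, d ≤ j := by
  intro N
  induction N with
  | zero =>
    intro fr U d hlen j hj
    cases fr with
    | nil => rw [levelVals] at hj; simp at hj
    | cons n fr => simp at hlen
  | succ N ihN =>
    intro fr U d hlen j hj
    cases fr with
    | nil => rw [levelVals] at hj; simp at hj
    | cons n fr' =>
      rw [levelVals] at hj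
      rcases List.mem_append.mp hj with hj | hj
      · obtain ⟨-, -, h⟩ := List.mem_map.mp hj; omega
      · have hlen' : (scanB g (n :: fr') U).1.length + (scanB g (n :: fr') U).2.length ≤ N := by
          have h1 := scanB_len g (n :: fr') U
          simp only [List.length_cons] at hlen
          omega
        have := ihN (scanB g (n :: fr') U).2 (scanB g (n :: fr') U).1 (d + 1) hlen' j hj
        omega

theorem mapconst_count (l : List String) (d i : Int) :
    (l.map (fun _ => d)).count i = if i = d then l.length else 0 := by
  induction l with
  | nil => simp
  | cons x l ih =>
    simp only [List.map_cons, List.count_cons, ih]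
    by_cases h : i = d
    · simp [h]
    · simp [h, Ne.symm h]

theorem count_levelVals (g : PySem.Dict String (List String)) :
    ∀ (N : Nat) (fr U : List String) (d m : Int),
      U.length + fr.length ≤ N → fr ≠ [] →
      m ∈ levelVals g fr U d → (∀ y ∈ levelVals g fr U d, y ≤ m) →
      (PySem.List.pyRange d (m + 1)).map (fun i => ((levelVals g fr U d).count i : Int))
        = loopB g fr U := by
  intro N
  induction N with
  | zero =>
    intro fr U d m hlen hfrne
    cases fr with
    | nil => exact absurd rfl hfrne
    | cons n fr => simp at hlen
  | succ N ihN =>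
    intro fr U d m hlen hfrne hmem hub
    rw [levelVals_unfold g fr U d hfrne] at hmem hub ⊢
    rw [loopB_unfold g fr U hfrne]
    have hlenS : (scanB g fr U).1.length + (scanB g fr U).2.length ≤ N := by
      have h1 := scanB_len g fr U
      have h2 : 1 ≤ fr.length := by
        cases fr with
        | nil => exact absurd rfl hfrne
        | cons a b => simp
      omega
    by_cases hS2 : (scanB g fr U).2 = []
    · -- a single final level: every value is d
      have htail : levelVals g (scanB g fr U).2 (scanB g fr U).1 (d + 1) = [] := by
        rw [hS2]; rw [levelVals]
      rw [htail] at hmem hub ⊢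
      have hmd : m = d := by
        rcases List.mem_append.mp hmem with h | h
        · obtain ⟨-, -, h⟩ := List.mem_map.mp h; omega
        · simp at h
      subst hmd
      rw [PySem.List.pyRange_one_cons (by omega : m < m + 1)]
      have hrange : PySem.List.pyRange (m + 1) (m + 1) = [] := by
        rw [List.eq_nil_iff_forall_not_mem]
        intro x hx
        rw [PySem.List.mem_pyRange_one] at hx
        omega
      rw [hrange]
      simp only [List.map_cons, List.map_nil, List.append_nil]
      rw [mapconst_count, if_pos rfl]
      rw [hS2]
      rw [loopB]
    · set S := scanB g fr U with hSdef
      set tail := levelVals g S.2 S.1 (d + 1) with htaildef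
      have htailne : tail ≠ [] := by
        rw [htaildef, levelVals_unfold g S.2 S.1 (d + 1) hS2]
        simp [hS2]
      obtain ⟨y, hy⟩ := List.exists_mem_of_ne_nil tail htailne
      have hge : ∀ j ∈ tail, d + 1 ≤ j := by
        intro j hj
        exact levelVals_ge g N S.2 S.1 (d + 1) hlenS j hj
      have hdm : d + 1 ≤ m := le_trans (hge y hy) (hub y (List.mem_append_right _ hy))
      have hmtail : m ∈ tail := by
        rcases List.mem_append.mp hmem with h | h
        · obtain ⟨-, -, h⟩ := List.mem_map.mp h; omega
        · exact h
      have hubtail : ∀ y ∈ tail, y ≤ m := fun y hy => hub y (List.mem_append_right _ hy)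
      have hrec := ihN S.2 S.1 (d + 1) m hlenS hS2 hmtail hubtail
      rw [PySem.List.pyRange_one_cons (by omega : d < m + 1)]
      simp only [List.map_cons]
      have hhead : ((fr.map (fun _ => d) ++ tail).count d : Int) = (fr.length : Int) := by
        rw [List.count_append, mapconst_count, if_pos rfl]
        have : tail.count d = 0 := by
          rw [List.count_eq_zero]
          intro h
          have := hge d h
          omega
        rw [this]
        simp
      rw [hhead]
      have htailmap : (PySem.List.pyRange (d + 1) (m + 1)).map
            (fun i => (((fr.map (fun _ => d) ++ tail).count i : Nat) : Int))
          = (PySem.List.pyRange (d + 1) (m + 1)).map (fun i => ((tail.count i : Nat) : Int)) := by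
        apply List.map_congr_left
        intro i hi
        rw [PySem.List.mem_pyRange_one] at hi
        rw [List.count_append, mapconst_count, if_neg (by omega)]
        simp
      rw [htailmap, hrec]

-- ---- the scans and loops only read the graph through getD with default [] ----

theorem scanB_congr (g1 g2 : PySem.Dict String (List String))
    (h : ∀ n, g1.getD n [] = g2.getD n []) (fr U : List String) :
    scanB g1 fr U = scanB g2 fr U := by
  have hgen : ∀ (fr : List String) (st : List String × List String),
      fr.foldl (fun st n => (g1.getD n []).foldl scanStepB st) st
        = fr.foldl (fun st n => (g2.getD n []).foldl scanStepB st) st := by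
    intro fr
    induction fr with
    | nil => intro st; rfl
    | cons n fr ih =>
      intro st
      simp only [List.foldl_cons]
      rw [h n]
      exact ih _
  exact hgen fr (U, [])

theorem loopB_congr (g1 g2 : PySem.Dict String (List String))
    (h : ∀ n, g1.getD n [] = g2.getD n []) :
    ∀ (N : Nat) (fr U : List String), U.length + fr.length ≤ N →
      loopB g1 fr U = loopB g2 fr U := by
  intro N
  induction N with
  | zero =>
    intro fr U hlen
    cases fr with
    | nil => rw [loopB, loopB]
    | cons n fr => simp at hlen
  | succ N ihN =>
    intro fr U hlen
    cases fr with
    | nil => rw [loopB, loopB]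
    | cons n fr =>
      have hfrne : (n :: fr) ≠ [] := List.cons_ne_nil n fr
      rw [loopB_unfold g1 _ _ hfrne, loopB_unfold g2 _ _ hfrne]
      rw [← scanB_congr g1 g2 h (n :: fr) U]
      have hlenS : (scanB g1 (n :: fr) U).1.length + (scanB g1 (n :: fr) U).2.length ≤ N := by
        have h1 := scanB_len g1 (n :: fr) U
        simp only [List.length_cons] at hlen
        omega
      rw [ihN (scanB g1 (n :: fr) U).2 (scanB g1 (n :: fr) U).1 hlenS]

-- ---- relating the two graph/node constructions ----

def gStepA (dd : PySem.Dict String (List String)) (pc : String × List String) :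
    PySem.Dict String (List String) :=
  pc.2.foldl (fun dd c => dd.modify pc.1 [] (· ++ [c])) dd

def iStepA (dd : PySem.Dict String (List String)) (pc : String × List String) :
    PySem.Dict String (List String) :=
  pc.2.foldl (fun dd c => dd.modify c [] (· ++ [pc.1])) dd

def nStepA (s : PySem.Set String) (pc : String × List String) : PySem.Set String :=
  PySem.Set.update (PySem.Set.add s pc.1) pc.2

def gStepB (dd : PySem.Dict String (List String)) (pc : String × List String) :
    PySem.Dict String (List String) :=
  dd.insert pc.1 (dd.getD pc.1 [] ++ pc.2)

def nStepB (s : PySem.Set String) (pc : String × List String) : PySem.Set String :=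
  (pc.1 :: pc.2).foldl PySem.Set.add s

def hStepB (s : PySem.Set String) (pc : String × List String) : PySem.Set String :=
  PySem.Set.update s pc.2

theorem innerA_split (p : String) (cs : List String) :
    ∀ (d1 d2 : PySem.Dict String (List String)),
      cs.foldl (fun gi child =>
          (gi.1.modify p [] (· ++ [child]), gi.2.modify child [] (· ++ [p]))) (d1, d2)
        = (cs.foldl (fun dd c => dd.modify p [] (· ++ [c])) d1,
           cs.foldl (fun dd c => dd.modify c [] (· ++ [p])) d2) := by
  induction cs with
  | nil => intro d1 d2; rfl
  | cons c cs ih => intro d1 d2; simp only [List.foldl_cons]; exact ih _ _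

theorem buildA_eq (bn : List (String × List String)) :
    buildA bn = (bn.foldl gStepA PySem.Dict.empty, bn.foldl iStepA PySem.Dict.empty,
      bn.foldl nStepA PySem.Set.empty) := by
  have hgen : ∀ (bn : List (String × List String))
      (s1 s2 : PySem.Dict String (List String)) (s3 : PySem.Set String),
      bn.foldl
        (fun st pc =>
          let an := PySem.Set.update (PySem.Set.add st.2.2 pc.1) pc.2
          let gi := pc.2.foldl
            (fun gi child =>
              (gi.1.modify pc.1 [] (· ++ [child]), gi.2.modify child [] (· ++ [pc.1])))
            (st.1, st.2.1)
          (gi.1, gi.2, an)) (s1, s2, s3)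
        = (bn.foldl gStepA s1, bn.foldl iStepA s2, bn.foldl nStepA s3) := by
    intro bn
    induction bn with
    | nil => intro s1 s2 s3; rfl
    | cons pc bn ih =>
      intro s1 s2 s3
      simp only [List.foldl_cons]
      rw [show (let an := PySem.Set.update (PySem.Set.add (s1, s2, s3).2.2 pc.1) pc.2
          let gi := pc.2.foldl
            (fun gi child =>
              (gi.1.modify pc.1 [] (· ++ [child]), gi.2.modify child [] (· ++ [pc.1])))
            ((s1, s2, s3).1, (s1, s2, s3).2.1)
          (gi.1, gi.2, an))
          = (gStepA s1 pc, iStepA s2 pc, nStepA s3 pc) from by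
        show (_, _, _) = _
        rw [innerA_split]
        rfl]
      exact ih _ _ _
  exact hgen bn _ _ _

theorem buildB_eq (bn : List (String × List String)) :
    buildB bn = (bn.foldl gStepB PySem.Dict.empty, bn.foldl nStepB PySem.Set.empty,
      bn.foldl hStepB PySem.Set.empty) := by
  have hgen : ∀ (bn : List (String × List String))
      (s1 : PySem.Dict String (List String)) (s2 s3 : PySem.Set String),
      bn.foldl
        (fun st pc =>
          let g := st.1.insert pc.1 (st.1.getD pc.1 [] ++ pc.2)
          let nodes := (pc.1 :: pc.2).foldl PySem.Set.add st.2.1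
          let hp := PySem.Set.update st.2.2 pc.2
          (g, nodes, hp)) (s1, s2, s3)
        = (bn.foldl gStepB s1, bn.foldl nStepB s2, bn.foldl hStepB s3) := by
    intro bn
    induction bn with
    | nil => intro s1 s2 s3; rfl
    | cons pc bn ih => intro s1 s2 s3; exact ih _ _ _
  exact hgen bn _ _ _

theorem gA_inner_getD (p : String) (cs : List String) :
    ∀ (dd : PySem.Dict String (List String)) (n : String),
      (cs.foldl (fun dd c => dd.modify p [] (· ++ [c])) dd).getD n []
        = if n = p then dd.getD n [] ++ cs else dd.getD n [] := by
  induction cs with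
  | nil => intro dd n; split <;> simp
  | cons c cs ih =>
    intro dd n
    simp only [List.foldl_cons]
    rw [ih]
    rw [PySem.Dict.getD_modify]
    by_cases hn : n = p
    · subst hn; simp
    · simp [hn]

theorem graph_ptwise (bn : List (String × List String)) :
    ∀ (d1 d2 : PySem.Dict String (List String)),
      (∀ n, d1.getD n [] = d2.getD n []) →
      ∀ n, (bn.foldl gStepA d1).getD n [] = (bn.foldl gStepB d2).getD n [] := by
  induction bn with
  | nil => intro d1 d2 h n; exact h n
  | cons pc bn ih =>
    intro d1 d2 h n
    simp only [List.foldl_cons]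
    apply ih
    intro x
    show (pc.2.foldl (fun dd c => dd.modify pc.1 [] (· ++ [c])) d1).getD x []
        = (d2.insert pc.1 (d2.getD pc.1 [] ++ pc.2)).getD x []
    rw [gA_inner_getD, PySem.Dict.getD_insert]
    split_ifs with hx
    · rw [hx, h pc.1]
    · exact h x

theorem nodes_eq (bn : List (String × List String)) (s : PySem.Set String) :
    bn.foldl nStepA s = bn.foldl nStepB s := rfl

theorem mem_foldl_add (l : List String) :
    ∀ (s : PySem.Set String) (x : String), x ∈ l.foldl PySem.Set.add s ↔ x ∈ s ∨ x ∈ l := by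
  induction l with
  | nil => intro s x; simp
  | cons c l ih =>
    intro s x
    simp only [List.foldl_cons]
    rw [ih]
    rw [PySem.Set.mem_add]
    simp
    tauto

theorem iA_inner_getD_nil (p : String) (cs : List String) :
    ∀ (dd : PySem.Dict String (List String)) (n : String),
      ((cs.foldl (fun dd c => dd.modify c [] (· ++ [p])) dd).getD n [] = [])
        ↔ (dd.getD n [] = [] ∧ n ∉ cs) := by
  induction cs with
  | nil => intro dd n; simp
  | cons c cs ih =>
    intro dd n
    simp only [List.foldl_cons]
    rw [ih]
    rw [PySem.Dict.getD_modify]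
    by_cases hn : n = c
    · subst hn; simp
    · simp [hn]

theorem contains_update_false (s : PySem.Set String) (l : List String) (x : String) :
    PySem.Set.contains (PySem.Set.update s l) x = false
      ↔ (PySem.Set.contains s x = false ∧ x ∉ l) := by
  have h1 : PySem.Set.contains (PySem.Set.update s l) x = true ↔ x ∈ s ∨ x ∈ l := by
    show PySem.Set.contains (l.foldl PySem.Set.add s) x = true ↔ _
    rw [PySem.Set.contains_iff, mem_foldl_add]
  have h2 := PySem.Set.contains_iff s x
  constructor
  · intro hc
    have hno : ¬ (x ∈ s ∨ x ∈ l) := by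
      intro hx
      rw [h1.mpr hx] at hc
      simp at hc
    rw [not_or] at hno
    refine ⟨?_, hno.2⟩
    rw [Bool.eq_false_iff]
    intro ht
    exact hno.1 (h2.mp ht)
  · rintro ⟨ha, hb⟩
    rw [Bool.eq_false_iff]
    intro ht
    rcases h1.mp ht with hx | hx
    · rw [h2.mpr hx] at ha; simp at ha
    · exact hb hx

theorem roots_rel (bn : List (String × List String)) :
    ∀ (d : PySem.Dict String (List String)) (s : PySem.Set String),
      (∀ n, (d.getD n [] = []) ↔ (PySem.Set.contains s n = false)) →
      ∀ n, ((bn.foldl iStepA d).getD n [] = [])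
        ↔ (PySem.Set.contains (bn.foldl hStepB s) n = false) := by
  induction bn with
  | nil => intro d s h n; exact h n
  | cons pc bn ih =>
    intro d s h n
    simp only [List.foldl_cons]
    apply ih
    intro x
    show ((pc.2.foldl (fun dd c => dd.modify c [] (· ++ [pc.1])) d).getD x [] = []) ↔ _
    rw [iA_inner_getD_nil]
    rw [show hStepB s pc = PySem.Set.update s pc.2 from rfl]
    rw [contains_update_false, h x]

theorem nodup_foldl_add (l : List String) :
    ∀ (s : PySem.Set String), s.Nodup → (l.foldl PySem.Set.add s).Nodup := by
  induction l with
  | nil => intro s h; exact h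
  | cons c l ih => intro s h; exact ih _ (PySem.Set.nodup_add s c h)

theorem nodes_nodup (bn : List (String × List String)) :
    ∀ (s : PySem.Set String), s.Nodup → (bn.foldl nStepB s).Nodup := by
  induction bn with
  | nil => intro s h; exact h
  | cons pc bn ih => intro s h; exact ih _ (nodup_foldl_add _ _ h)

theorem mem_nodes (bn : List (String × List String)) :
    ∀ (s : PySem.Set String) (x : String),
      x ∈ bn.foldl nStepB s ↔ x ∈ s ∨ ∃ pr ∈ bn, x = pr.1 ∨ x ∈ pr.2 := by
  induction bn with
  | nil => intro s x; simp
  | cons pc bn ih =>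
    intro s x
    simp only [List.foldl_cons]
    rw [ih]
    show x ∈ (pc.1 :: pc.2).foldl PySem.Set.add s ∨ _ ↔ _
    rw [mem_foldl_add]
    simp only [List.mem_cons]
    constructor
    · rintro ((h | h) | h)
      · exact Or.inl h
      · exact Or.inr ⟨pc, by simp, by tauto⟩
      · obtain ⟨pr, hpr, hx⟩ := h; exact Or.inr ⟨pr, by simp [hpr], hx⟩
    · rintro (h | h2)
      · exact Or.inl (Or.inl h)
      · obtain ⟨pr, hpr, hx⟩ := h2
        rcases (by simpa using hpr : pr = pc ∨ pr ∈ bn) with hpr2 | hpr2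
        · subst hpr2; tauto
        · exact Or.inr ⟨pr, hpr2, hx⟩

theorem contains_hp (bn : List (String × List String)) :
    ∀ (s : PySem.Set String) (x : String),
      PySem.Set.contains (bn.foldl hStepB s) x = true
        ↔ PySem.Set.contains s x = true ∨ ∃ pr ∈ bn, x ∈ pr.2 := by
  induction bn with
  | nil => intro s x; simp
  | cons pc bn ih =>
    intro s x
    simp only [List.foldl_cons]
    rw [ih]
    show PySem.Set.contains ((pc.2).foldl PySem.Set.add s) x = true ∨ _ ↔ _
    rw [PySem.Set.contains_iff, mem_foldl_add, ← PySem.Set.contains_iff]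
    constructor
    · rintro ((h | h) | h)
      · exact Or.inl h
      · exact Or.inr ⟨pc, by simp, h⟩
      · obtain ⟨pr, hpr, hx⟩ := h; exact Or.inr ⟨pr, by simp [hpr], hx⟩
    · rintro (h | h2)
      · exact Or.inl (Or.inl h)
      · obtain ⟨pr, hpr, hx⟩ := h2
        rcases (by simpa using hpr : pr = pc ∨ pr ∈ bn) with hpr2 | hpr2
        · subst hpr2; exact Or.inl (Or.inr hx)
        · exact Or.inr ⟨pr, hpr2, hx⟩

theorem initRoots_eq (inv : PySem.Dict String (List String)) :
    ∀ (ls : List String) (dd : PySem.Dict String Int) (q : List String),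
      ls.foldl (fun st node =>
          if (inv.getD node []).length = 0 then (st.1.insert node 0, st.2 ++ [node]) else st)
        (dd, q)
        = (insAll dd (ls.filter (fun n => (inv.getD n []).length == 0)) 0,
           q ++ ls.filter (fun n => (inv.getD n []).length == 0)) := by
  intro ls
  induction ls with
  | nil => intro dd q; simp [insAll]
  | cons c ls ih =>
    intro dd q
    simp only [List.foldl_cons, List.filter_cons]
    by_cases h : (inv.getD c []).length = 0
    · rw [if_pos h, if_pos (by simpa using h)]
      rw [ih]
      simp [insAll]
    · rw [if_neg h, if_neg (by simpa using h)]
      exact ih dd q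

theorem main_eq (bn : List (String × List String))
    (hPre : Pre_calculate_latent_dim_hierarchy bn) :
    calculate_latent_dim_hierarchy bn = calculate_latent_dim_hierarchy_alt bn := by
  obtain ⟨pr, hpr, hroot⟩ := hPre
  have hg : ∀ n, (bn.foldl gStepA PySem.Dict.empty).getD n []
      = (bn.foldl gStepB PySem.Dict.empty).getD n [] :=
    graph_ptwise bn _ _ (fun n => rfl)
  have hr : ∀ n, ((bn.foldl iStepA PySem.Dict.empty).getD n [] = [])
      ↔ (PySem.Set.contains (bn.foldl hStepB PySem.Set.empty) n = false) :=
    roots_rel bn _ _ (fun n => ⟨fun _ => rfl, fun _ => rfl⟩)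
  set gA := bn.foldl gStepA PySem.Dict.empty with hgA
  set invA := bn.foldl iStepA PySem.Dict.empty with hinvA
  set gB := bn.foldl gStepB PySem.Dict.empty with hgB
  set nodes := bn.foldl nStepB PySem.Set.empty with hnodes
  set hp := bn.foldl hStepB PySem.Set.empty with hhp
  set fr0 := nodes.filter (fun n => !(PySem.Set.contains hp n)) with hfr0def
  set U0 := nodes.filter (fun n => PySem.Set.contains hp n) with hU0def
  have hcondB : ∀ n, ((invA.getD n []).length == 0) = !(PySem.Set.contains hp n) := by
    intro n
    have h := hr n
    cases hc : PySem.Set.contains hp n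
    · rw [hc] at h
      have : invA.getD n [] = [] := h.mpr rfl
      simp [this]
    · rw [hc] at h
      simp only [Bool.not_true]
      rw [beq_eq_false_iff_ne]
      intro h0
      have := h.mp (List.length_eq_zero_iff.mp h0)
      simp at this
  set layer0 := insAll PySem.Dict.empty fr0 0 with hlayer0
  have hnodesnd : nodes.Nodup := nodes_nodup bn [] List.nodup_nil
  have hfr0nd : fr0.Nodup := List.Nodup.filter _ hnodesnd
  have hU0nd : U0.Nodup := List.Nodup.filter _ hnodesnd
  have hdisj0 : ∀ x ∈ U0, layer0.contains x = false := by
    intro x hx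
    obtain ⟨hxn, hxc⟩ := List.mem_filter.mp hx
    rw [Bool.eq_false_iff, Ne, hlayer0, insAll_contains]
    rintro (hmem | habs)
    · obtain ⟨-, hcf⟩ := List.mem_filter.mp hmem
      simp only [Bool.not_eq_eq_eq_not, Bool.not_true] at hcf
      rw [hcf] at hxc
      simp at hxc
    · rw [PySem.Dict.contains_empty] at habs
      simp at habs
  have hfr0 : ∀ x ∈ fr0, layer0.contains x = true ∧ layer0.getD x 0 = 0 := by
    intro x hx
    exact ⟨(insAll_contains _ _ _ _).mpr (Or.inl hx), insAll_getD_of_mem _ _ _ _ hx⟩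
  have hxmem : pr.1 ∈ nodes := (mem_nodes bn [] pr.1).mpr (Or.inr ⟨pr, hpr, Or.inl rfl⟩)
  have hxhp : PySem.Set.contains hp pr.1 = false := by
    rw [Bool.eq_false_iff]
    intro ht
    rcases (contains_hp bn [] pr.1).mp ht with h | ⟨qr, hqr, hmem⟩
    · simp at h
    · exact hroot qr hqr hmem
  have hfr0ne : fr0 ≠ [] :=
    List.ne_nil_of_mem (List.mem_filter.mpr ⟨hxmem, by rw [hxhp]; rfl⟩)
  -- the values of the final layer dict are exactly the per-level constants
  have hvals2 : (bfsA gA U0 fr0 layer0).values = levelVals gA fr0 U0 0 := by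
    rw [bfsA_values gA (U0.length + fr0.length) fr0 U0 layer0 0 le_rfl hU0nd hdisj0 hfr0]
    rw [hlayer0, insAll_values _ _ _ (fun a _ => PySem.Dict.contains_empty a) hfr0nd]
    rw [levelVals_unfold gA fr0 U0 0 hfr0ne]
    simp [show (PySem.Dict.empty : PySem.Dict String Int).values = [] from rfl]
  -- unfold both ports
  unfold calculate_latent_dim_hierarchy calculate_latent_dim_hierarchy_alt
  rw [buildA_eq, buildB_eq]
  simp only
  rw [← hgA, ← hinvA, ← hgB, ← hnodes, ← hhp]
  rw [show bn.foldl nStepA PySem.Set.empty = nodes from nodes_eq bn PySem.Set.empty]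
  unfold initRootsA
  rw [initRoots_eq invA nodes PySem.Dict.empty []]
  simp only [List.nil_append]
  have hfilter1 : nodes.filter (fun n => (invA.getD n []).length == 0) = fr0 := by
    rw [hfr0def]
    exact List.filter_congr (fun n _ => hcondB n)
  have hfilter2 : nodes.filter (fun n => !((invA.getD n []).length == 0)) = U0 := by
    rw [hU0def]
    refine List.filter_congr (fun n _ => ?_)
    rw [hcondB n, Bool.not_not]
  rw [hfilter1, hfilter2]
  rw [← hlayer0]
  have hcounter : (bfsA gA U0 fr0 layer0).items.foldl
      (fun c kv => c.modify kv.2 0 (· + 1)) PySem.Dict.empty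
      = PySem.Dict.counter (bfsA gA U0 fr0 layer0).values := by
    have h0 : PySem.Dict.counter (bfsA gA U0 fr0 layer0).values
        = ((bfsA gA U0 fr0 layer0).items.map Prod.snd).foldl
          (fun c x => c.modify x 0 (· + 1)) PySem.Dict.empty := rfl
    rw [h0, List.foldl_map]
  rw [hcounter, hvals2]
  have hvne : levelVals gA fr0 U0 0 ≠ [] := by
    rw [levelVals_unfold gA fr0 U0 0 hfr0ne]
    simp [hfr0ne]
  cases hmax : PySem.List.max? (levelVals gA fr0 U0 0) (fun v => v) with
  | none => exact absurd ((PySem.List.max?_eq_none_iff _ _).mp hmax) hvne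
  | some m =>
    dsimp only
    have hmem : m ∈ levelVals gA fr0 U0 0 := PySem.List.max?_mem hmax
    have hub : ∀ y ∈ levelVals gA fr0 U0 0, y ≤ m := PySem.List.max?_isMax hmax
    have hcl := count_levelVals gA (U0.length + fr0.length) fr0 U0 0 m le_rfl hfr0ne hmem hub
    have hmapeq : (PySem.List.pyRange 0 (m + 1)).map
          (fun i => (PySem.Dict.counter (levelVals gA fr0 U0 0)).getD i 0)
        = (PySem.List.pyRange 0 (m + 1)).map
          (fun i => (((levelVals gA fr0 U0 0).count i : Nat) : Int)) := by
      exact List.map_congr_left (fun i _ => PySem.Dict.getD_counter _ i)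
    rw [hmapeq, hcl]
    exact loopB_congr gA gB hg (U0.length + fr0.length) fr0 U0 le_rfl

-- ===== VERDICT (by name: the statement is the Claim_ definition above) =====
theorem calculate_latent_dim_hierarchy_spec : Claim_equal_calculate_latent_dim_hierarchy := by
  intro bn _ hPre
  exact main_eq bn hPre
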